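-- pv_equiv track=rewrite | github.com/RoBorregos/home2 | task_manager/scripts/storing_groceries.py | categorize_object
-- ===== SOURCE A (Python) =====
-- def categorize_object(object_detection):
--     """Determine category of detected object"""
--     # This would use vision APIs to determine category based on detected features
--     categories = {
--         "cereals": ["cereal box", "oatmeal", "granola"],
--         "canned_goods": ["soup can", "beans can", "tuna can"],
--         "spices": ["salt", "pepper", "oregano", "cinnamon"],
--         "containers": ["bowl", "container", "jar", "tupperware"],
--         "utensils": ["spoon", "fork", "knife", "spatula"]
--     }
--
--     # Mock implementation - would be replaced with actual vision classification
--     for category, items in categories.items():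
--         if object_detection['label'].lower() in items:
--             return category
--
--     return "miscellaneous"
-- ===== SOURCE B (Python) =====
-- # Binary search over a sorted key table instead of scanning the category lists.
-- _KEYS = ["beans can", "bowl", "cereal box", "cinnamon", "container", "fork",
--          "granola", "jar", "knife", "oatmeal", "oregano", "pepper", "salt",
--          "soup can", "spatula", "spoon", "tuna can", "tupperware"]
-- _CATS = ["canned_goods", "containers", "cereals", "spices", "containers", "utensils",
--          "cereals", "containers", "utensils", "cereals", "spices", "spices", "spices",
--          "canned_goods", "utensils", "utensils", "canned_goods", "containers"]
--
-- def categorize_object(object_detection):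
--     """Determine category of detected object"""
--     label = object_detection["label"].lower()
--     lo, hi = 0, len(_KEYS)
--     while lo < hi:
--         mid = (lo + hi) // 2
--         if _KEYS[mid] < label:
--             lo = mid + 1
--         else:
--             hi = mid
--     if lo < len(_KEYS) and _KEYS[lo] == label:
--         return _CATS[lo]
--     return "miscellaneous"
-- ===== Notes on version B (the rewrite author's own statement) =====
-- stated objective: alternative
-- what changed: Replaces the loop over categories with inner list-membership tests by a binary search over a single sorted key table aligned with a parallel category table.
import Mathlib
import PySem

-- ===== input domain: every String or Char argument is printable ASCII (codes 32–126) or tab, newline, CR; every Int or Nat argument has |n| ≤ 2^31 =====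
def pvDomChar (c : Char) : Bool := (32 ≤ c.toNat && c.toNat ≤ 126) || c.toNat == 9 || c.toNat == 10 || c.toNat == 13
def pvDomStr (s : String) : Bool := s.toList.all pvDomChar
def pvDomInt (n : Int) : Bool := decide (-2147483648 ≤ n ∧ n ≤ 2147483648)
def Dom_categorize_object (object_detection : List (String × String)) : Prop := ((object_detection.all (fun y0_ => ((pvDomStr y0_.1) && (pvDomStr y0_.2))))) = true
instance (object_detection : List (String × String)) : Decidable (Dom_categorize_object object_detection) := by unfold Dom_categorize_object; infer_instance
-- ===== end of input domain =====

-- B replaces A's loop over categories (with inner membership tests) by a binary search over one sorted key table with a parallel category table.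
-- ===== PORT A =====
def categorize_object (object_detection : List (String × String)) : String :=
  let label := PySem.Str.lower (((PySem.Dict.mk object_detection).get? "label").getD "")
  if ["cereal box", "oatmeal", "granola"].contains label then "cereals"
  else if ["soup can", "beans can", "tuna can"].contains label then "canned_goods"
  else if ["salt", "pepper", "oregano", "cinnamon"].contains label then "spices"
  else if ["bowl", "container", "jar", "tupperware"].contains label then "containers"
  else if ["spoon", "fork", "knife", "spatula"].contains label then "utensils"
  else "miscellaneous"

-- ===== PORT B =====
def pvKeys : List String :=
  ["beans can", "bowl", "cereal box", "cinnamon", "container", "fork",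
   "granola", "jar", "knife", "oatmeal", "oregano", "pepper", "salt",
   "soup can", "spatula", "spoon", "tuna can", "tupperware"]
def pvCats : List String :=
  ["canned_goods", "containers", "cereals", "spices", "containers", "utensils",
   "cereals", "containers", "utensils", "cereals", "spices", "spices", "spices",
   "canned_goods", "utensils", "utensils", "canned_goods", "containers"]

-- the 'while lo < hi' loop of Source B; fuel only makes the recursion structural (18 ≥ the loop's iteration count)
def pvBisect (label : String) : Nat → Nat → Nat → Nat
  | 0, lo, _ => lo
  | fuel+1, lo, hi =>
    if lo < hi then
      let mid := (lo + hi) / 2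
      if pvKeys.getD mid "" < label then pvBisect label fuel (mid + 1) hi
      else pvBisect label fuel lo mid
    else lo

def categorize_object_alt (object_detection : List (String × String)) : String :=
  let label := PySem.Str.lower (((PySem.Dict.mk object_detection).get? "label").getD "")
  let lo := pvBisect label 18 0 18
  if lo < 18 && (pvKeys.getD lo "" == label) then pvCats.getD lo "miscellaneous"
  else "miscellaneous"

-- ===== PRECONDITION & SPEC =====
-- A raises KeyError when the dict has no "label" key; Pre_ requires the key to be present.
def Pre_categorize_object (object_detection : List (String × String)) : Prop :=
  "label" ∈ object_detection.map Prod.fst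
instance (object_detection : List (String × String)) : Decidable (Pre_categorize_object object_detection) := by unfold Pre_categorize_object; infer_instance
def pvWitness_categorize_object : (List (String × String)) := [("label", "Salt")]
def Spec_categorize_object (object_detection : List (String × String)) (out : String) : Prop := out = categorize_object_alt object_detection
instance (object_detection : List (String × String)) (out : String) : Decidable (Spec_categorize_object object_detection out) := by unfold Spec_categorize_object; infer_instance

-- ===== CLAIM (what is proved, stated in full; the proofs are below) =====
def Claim_equal_categorize_object : Prop := ∀ (object_detection : List (String × String)), Dom_categorize_object object_detection → Pre_categorize_object object_detection → Spec_categorize_object object_detection (categorize_object object_detection)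

-- ===== LEMMAS AND PROOFS =====
theorem chain_eq_bisect (s : String) :
    (if ["cereal box", "oatmeal", "granola"].contains s then "cereals"
     else if ["soup can", "beans can", "tuna can"].contains s then "canned_goods"
     else if ["salt", "pepper", "oregano", "cinnamon"].contains s then "spices"
     else if ["bowl", "container", "jar", "tupperware"].contains s then "containers"
     else if ["spoon", "fork", "knife", "spatula"].contains s then "utensils"
     else "miscellaneous")
    = (if pvBisect s 18 0 18 < 18 && (pvKeys.getD (pvBisect s 18 0 18) "" == s)
       then pvCats.getD (pvBisect s 18 0 18) "miscellaneous" else "miscellaneous") := by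
  by_cases h0 : s = "cereal box"
  · subst h0; simp [pvBisect, pvKeys, pvCats]; decide
  by_cases h1 : s = "oatmeal"
  · subst h1; simp [pvBisect, pvKeys, pvCats]; decide
  by_cases h2 : s = "granola"
  · subst h2; simp [pvBisect, pvKeys, pvCats]; decide
  by_cases h3 : s = "soup can"
  · subst h3; simp [pvBisect, pvKeys, pvCats]; decide
  by_cases h4 : s = "beans can"
  · subst h4; simp [pvBisect, pvKeys, pvCats]; decide
  by_cases h5 : s = "tuna can"
  · subst h5; simp [pvBisect, pvKeys, pvCats]; decide
  by_cases h6 : s = "salt"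
  · subst h6; simp [pvBisect, pvKeys, pvCats]; decide
  by_cases h7 : s = "pepper"
  · subst h7; simp [pvBisect, pvKeys, pvCats]; decide
  by_cases h8 : s = "oregano"
  · subst h8; simp [pvBisect, pvKeys, pvCats]; decide
  by_cases h9 : s = "cinnamon"
  · subst h9; simp [pvBisect, pvKeys, pvCats]; decide
  by_cases h10 : s = "bowl"
  · subst h10; simp [pvBisect, pvKeys, pvCats]; decide
  by_cases h11 : s = "container"
  · subst h11; simp [pvBisect, pvKeys, pvCats]; decide
  by_cases h12 : s = "jar"
  · subst h12; simp [pvBisect, pvKeys, pvCats]; decide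
  by_cases h13 : s = "tupperware"
  · subst h13; simp [pvBisect, pvKeys, pvCats]; decide
  by_cases h14 : s = "spoon"
  · subst h14; simp [pvBisect, pvKeys, pvCats]; decide
  by_cases h15 : s = "fork"
  · subst h15; simp [pvBisect, pvKeys, pvCats]; decide
  by_cases h16 : s = "knife"
  · subst h16; simp [pvBisect, pvKeys, pvCats]; decide
  by_cases h17 : s = "spatula"
  · subst h17; simp [pvBisect, pvKeys, pvCats]; decide
  simp [pvBisect, pvKeys, h0, h1, h2, h3, h4, h5, h6, h7, h8, h9, h10, h11,
        h12, h13, h14, h15, h16, h17]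
  split_ifs <;>
    simp_all [pvCats, Ne.symm h0, Ne.symm h1, Ne.symm h2, Ne.symm h3, Ne.symm h4,
      Ne.symm h5, Ne.symm h6, Ne.symm h7, Ne.symm h8, Ne.symm h9, Ne.symm h10, Ne.symm h11,
      Ne.symm h12, Ne.symm h13, Ne.symm h14, Ne.symm h15, Ne.symm h16, Ne.symm h17]

-- ===== VERDICT (by name: the statement is the Claim_ definition above) =====
theorem categorize_object_spec : Claim_equal_categorize_object := by
  intro od _ _
  unfold Spec_categorize_object categorize_object categorize_object_alt
  exact chain_eq_bisect _
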